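-- pv_equiv track=rewrite | github.com/neizod/problems | acm/livearchive/5392-word-index.py | ascending_increment
-- ===== SOURCE A (Python) =====
-- def ascending_increment(ls, lim=26):
--     if not ls:
--         raise ValueError('Can not increase value of the sequence furthermore.')
--     if ls[-1] < lim:
--         ls[-1] += 1
--     else:
--         ls[:-1] = ascending_increment(ls[:-1], lim-1)
--         ls[-1] = ls[-2] + 1
--     return ls
-- ===== SOURCE B (Python) =====
-- def ascending_increment(ls, lim=26):
--     n = len(ls)
--     i = next((j for j in range(n - 1, -1, -1) if ls[j] < lim - (n - 1 - j)), None)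
--     if i is None:
--         raise ValueError('Can not increase value of the sequence furthermore.')
--     ls[i:] = [ls[i] + 1 + k for k in range(n - i)]
--     return ls
-- ===== Notes on version B (the rewrite author's own statement) =====
-- stated objective: simpler
-- what changed: Replaces A's right-to-left recursion with slice copies/reassignments by a single right-to-left index scan for the rightmost position i with ls[i] < lim-(n-1-i), then one slice assignment writing the consecutive run; no recursion and no intermediate list copies.
import Mathlib
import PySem

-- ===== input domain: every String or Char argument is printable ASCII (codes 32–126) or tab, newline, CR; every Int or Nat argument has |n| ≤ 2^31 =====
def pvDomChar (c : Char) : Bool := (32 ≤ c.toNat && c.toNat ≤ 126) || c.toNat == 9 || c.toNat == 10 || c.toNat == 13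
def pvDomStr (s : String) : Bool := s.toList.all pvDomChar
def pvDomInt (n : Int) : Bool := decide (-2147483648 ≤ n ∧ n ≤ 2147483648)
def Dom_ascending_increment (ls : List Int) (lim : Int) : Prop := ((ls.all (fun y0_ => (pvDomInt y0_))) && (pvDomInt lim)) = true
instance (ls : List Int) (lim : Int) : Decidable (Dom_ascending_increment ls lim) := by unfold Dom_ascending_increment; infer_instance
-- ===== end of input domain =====

-- B replaces A's right-to-left recursion (with slice copies) by one scan for the rightmost
-- incrementable index followed by one slice write; equivalence is about the RETURN value
-- (both Pythons also mutate ls in place to the same final contents).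


-- ===== PORT A =====
-- A recurses on ls[:-1] with lim-1 when the last element is at the limit;
-- the empty case raises ValueError (excluded by Pre_, the port returns []).
def ascending_increment (ls : List Int) (lim : Int) : List Int :=
  if h : ls = [] then []                               -- raise ValueError (outside Pre_)
  else if ls.getLast h < lim then
    ls.dropLast ++ [ls.getLast h + 1]                  -- ls[-1] += 1
  else
    let pre := ascending_increment ls.dropLast (lim - 1)   -- ls[:-1] = ascending_increment(ls[:-1], lim-1)
    pre ++ [(pre.getLast?).getD 0 + 1]                 -- ls[-1] = ls[-2] + 1
termination_by ls.length
decreasing_by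
  have : ls.length ≠ 0 := fun h0 => h (List.eq_nil_of_length_eq_zero h0)
  simp [List.length_dropLast]; omega

-- ===== PORT B =====
-- next((j for j in range(n-1, -1, -1) if ls[j] < lim - (n-1-j)), None)
def altFind (ls : List Int) (lim : Int) : Nat → Option Nat
  | 0 => none
  | i + 1 =>
    if ls.getD i 0 < lim - ((ls.length : Int) - 1 - (i : Int)) then some i
    else altFind ls lim i

def ascending_increment_alt (ls : List Int) (lim : Int) : List Int :=
  match altFind ls lim ls.length with
  | none => []                                          -- raise ValueError (outside Pre_)
  | some i =>
    -- ls[i:] = [ls[i] + 1 + k for k in range(n - i)]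
    ls.take i ++ (List.range (ls.length - i)).map (fun (k : Nat) => ls.getD i 0 + 1 + (k : Int))

-- ===== PRECONDITION & SPEC =====
-- Pre_ excludes exactly the inputs on which A raises ValueError: those with no index i
-- such that ls[i] < lim - (n-1-i) (in particular the empty list).
def Pre_ascending_increment (ls : List Int) (lim : Int) : Prop :=
  ∃ i < ls.length, ls.getD i 0 < lim - ((ls.length : Int) - 1 - (i : Int))
instance (ls : List Int) (lim : Int) : Decidable (Pre_ascending_increment ls lim) := by
  unfold Pre_ascending_increment; infer_instance

def pvWitness_ascending_increment : List Int × Int := ([1, 2, 3], 26)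

def Spec_ascending_increment (ls : List Int) (lim : Int) (out : List Int) : Prop := out = ascending_increment_alt ls lim
instance (ls : List Int) (lim : Int) (out : List Int) : Decidable (Spec_ascending_increment ls lim out) := by unfold Spec_ascending_increment; infer_instance

-- ===== CLAIM (what is proved, stated in full; the proofs are below) =====
def Claim_equal_ascending_increment : Prop := ∀ (ls : List Int) (lim : Int), Dom_ascending_increment ls lim → Pre_ascending_increment ls lim → Spec_ascending_increment ls lim (ascending_increment ls lim)

-- ===== LEMMAS AND PROOFS =====

lemma altFind_none_iff (ls : List Int) (lim : Int) (k : Nat) :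
    altFind ls lim k = none ↔
      ∀ i < k, ¬ ls.getD i 0 < lim - ((ls.length : Int) - 1 - (i : Int)) := by
  induction k with
  | zero => simp [altFind]
  | succ k ih =>
    simp only [altFind]
    split_ifs with hc
    · constructor
      · intro h; cases h
      · intro h; exact absurd hc (h k (Nat.lt_succ_self k))
    · rw [ih]
      constructor
      · intro h i hi
        rcases Nat.lt_succ_iff_lt_or_eq.mp hi with hi' | rfl
        · exact h i hi'
        · exact hc
      · intro h i hi; exact h i (Nat.lt_succ_of_lt hi)

lemma altFind_some_lt (ls : List Int) (lim : Int) (k i : Nat)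
    (h : altFind ls lim k = some i) : i < k := by
  induction k with
  | zero => simp [altFind] at h
  | succ k ih =>
    simp only [altFind] at h
    split_ifs at h with hc
    · cases h; exact Nat.lt_succ_self i
    · exact Nat.lt_succ_of_lt (ih h)

lemma altFind_dropLast (ls : List Int) (lim : Int) (k : Nat)
    (hk : k + 1 ≤ ls.length) :
    altFind ls lim k = altFind ls.dropLast (lim - 1) k := by
  induction k with
  | zero => simp [altFind]
  | succ k ih =>
    have hk' : k + 1 ≤ ls.length := Nat.le_of_succ_le hk
    have hkd : k < ls.dropLast.length := by
      simp [List.length_dropLast]; omega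
    have hget : ls.dropLast.getD k 0 = ls.getD k 0 := by
      rw [List.getD_eq_getElem _ _ hkd, List.getD_eq_getElem _ _ (by omega)]
      exact List.getElem_dropLast hkd
    have hlen : ((ls.dropLast.length : Int)) = (ls.length : Int) - 1 := by
      simp [List.length_dropLast]; omega
    simp only [altFind, hget, hlen, ih hk']
    have harith : lim - ((ls.length : Int) - 1 - (k : Int))
        = lim - 1 - ((ls.length : Int) - 1 - 1 - (k : Int)) := by ring
    rw [harith]

lemma altFind_some_cond (ls : List Int) (lim : Int) (k i : Nat)
    (h : altFind ls lim k = some i) :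
    ls.getD i 0 < lim - ((ls.length : Int) - 1 - (i : Int)) := by
  induction k with
  | zero => simp [altFind] at h
  | succ k ih =>
    simp only [altFind] at h
    split_ifs at h with hc
    · cases h; exact hc
    · exact ih h

-- main equivalence, by strong induction on the length bound
lemma A_eq_alt : ∀ (n : Nat) (ls : List Int) (lim : Int), ls.length ≤ n →
    Pre_ascending_increment ls lim →
    ascending_increment ls lim = ascending_increment_alt ls lim := by
  intro n
  induction n with
  | zero =>
    intro ls lim hlen hpre
    rcases hpre with ⟨i, hi, _⟩; omega
  | succ n ih =>
    intro ls lim hlen hpre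
    have hne : ls ≠ [] := by
      rcases hpre with ⟨i, hi, _⟩
      intro h0; rw [h0] at hi; simp at hi
    obtain ⟨m, hm⟩ : ∃ m, ls.length = m + 1 := by
      cases hlsl : ls.length with
      | zero => exact absurd (List.eq_nil_of_length_eq_zero hlsl) hne
      | succ m => exact ⟨m, rfl⟩
    have hmlt : m < ls.length := by omega
    have hgetlast : ls.getLast hne = ls.getD m 0 := by
      rw [List.getD_eq_getElem _ _ hmlt, List.getLast_eq_getElem]
      congr 1; omega
    by_cases hlast : ls.getLast hne < lim
    · -- last element below limit: both increment it
      have hcond : ls.getD m 0 < lim - ((ls.length : Int) - 1 - (m : Int)) := by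
        rw [← hgetlast]; rw [hm]; push_cast; simpa using hlast
      have hfind : altFind ls lim ls.length = some m := by
        rw [hm]; simp only [altFind]; rw [if_pos hcond]
      rw [ascending_increment]
      rw [dif_neg hne, if_pos hlast]
      simp only [ascending_increment_alt, hfind]
      have h1 : ls.length - m = 1 := by omega
      rw [h1]
      simp [List.range_one, List.dropLast_eq_take, hm, hgetlast]
    · -- last element at/over limit: A recurses; alt skips index m
      have hcond : ¬ ls.getD m 0 < lim - ((ls.length : Int) - 1 - (m : Int)) := by
        rw [← hgetlast]; rw [hm]; push_cast; simpa using hlast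
      have hfind1 : altFind ls lim ls.length = altFind ls lim m := by
        rw [hm]; simp only [altFind]; rw [if_neg hcond]
      have hfind2 : altFind ls lim m = altFind ls.dropLast (lim - 1) m := by
        apply altFind_dropLast; omega
      have hdll : ls.dropLast.length = m := by simp [List.length_dropLast, hm]
      -- alt's search must succeed, since Pre_ holds and index m fails
      have hsome : ∃ i, altFind ls.dropLast (lim - 1) m = some i := by
        cases hf : altFind ls.dropLast (lim - 1) m with
        | some i => exact ⟨i, rfl⟩
        | none =>
          exfalso
          rcases hpre with ⟨i, hi, hci⟩
          have hfi : altFind ls lim ls.length = none := by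
            rw [hfind1, hfind2, hf]
          rw [altFind_none_iff] at hfi
          exact hfi i hi hci
      rcases hsome with ⟨i, hf⟩
      have hilt : i < m := altFind_some_lt _ _ _ _ hf
      have hcondi := altFind_some_cond ls.dropLast (lim - 1) m i hf
      have hpre' : Pre_ascending_increment ls.dropLast (lim - 1) := by
        exact ⟨i, by omega, hcondi⟩
      have hA' := ih ls.dropLast (lim - 1) (by omega) hpre'
      rw [ascending_increment]
      rw [dif_neg hne, if_neg hlast]
      have halt' : ascending_increment_alt ls.dropLast (lim - 1)
          = ls.dropLast.take i ++
            (List.range (m - i)).map (fun (k : Nat) => ls.dropLast.getD i 0 + 1 + (k : Int)) := by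
        simp only [ascending_increment_alt, hdll, hf]
      have hgeti : ls.dropLast.getD i 0 = ls.getD i 0 := by
        rw [List.getD_eq_getElem _ _ (by omega), List.getD_eq_getElem _ _ (by omega)]
        exact List.getElem_dropLast (by omega)
      have htakei : ls.dropLast.take i = ls.take i := by
        rw [List.dropLast_eq_take, List.take_take]
        congr 1; omega
      simp only [ascending_increment_alt, hfind1, hfind2, hf]
      rw [hA', halt', hgeti, htakei]
      -- remaining: list arithmetic
      obtain ⟨p, hp⟩ : ∃ p, m - i = p + 1 := ⟨m - i - 1, by omega⟩
      have hni : ls.length - i = p + 2 := by omega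
      have hmap2 : (List.range (ls.length - i)).map (fun (k : Nat) => ls.getD i 0 + 1 + (k : Int))
          = (List.range (m - i)).map (fun (k : Nat) => ls.getD i 0 + 1 + (k : Int))
            ++ [ls.getD i 0 + 1 + ((p : Int) + 1)] := by
        rw [hni, hp, List.range_succ, List.map_append]
        simp
      have hlast2 : (ls.take i ++
          (List.range (m - i)).map (fun (k : Nat) => ls.getD i 0 + 1 + (k : Int))).getLast?
          = some (ls.getD i 0 + 1 + (p : Int)) := by
        rw [hp, List.range_succ, List.map_append, ← List.append_assoc]
        simp
      rw [hmap2, hlast2]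
      rw [← List.append_assoc]
      congr 1
      · simp only [Option.getD_some]
        congr 1
        ring

-- ===== VERDICT (by name: the statement is the Claim_ definition above) =====
theorem ascending_increment_spec : Claim_equal_ascending_increment := by
  intro ls lim _ hpre
  unfold Spec_ascending_increment
  exact A_eq_alt ls.length ls lim le_rfl hpre
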